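-- pv_equiv track=rewrite | github.com/dona1214/Algorithm | PYTHON/LEVEL1/sortString.py | solution
-- ===== SOURCE A (Python) =====
-- def solution(strings, n):
--     list = []
--     answer = []
--     for i in range(len(strings)):
--         list.append(strings[i][n:n+1])
--
--
--     strings.sort()
--     list.sort()
--
--     for j in range(len(list)):
--         for i in range(len(strings)):
--             if strings[i][n:n+1] == list[j]:
--                 if strings[i] not in answer:
--                     answer.append(strings[i])
--     return answer
-- ===== SOURCE B (Python) =====
-- def solution(strings, n):
--     strings.sort()
--     groups = {}
--     for s in strings:
--         groups.setdefault(s[n:n+1], []).append(s)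
--     answer = []
--     seen = set()
--     for k in sorted(groups):
--         for s in groups[k]:
--             if s not in seen:
--                 seen.add(s)
--                 answer.append(s)
--     return answer
-- ===== Notes on version B (the rewrite author's own statement) =====
-- stated objective: faster
-- what changed: Replaces A's nested scan (for every sorted key, rescan all strings and do a linear 'not in answer' check) with one dict-grouping pass over the sorted strings plus an ordered emit over sorted distinct keys guarded by a seen-set.
import Mathlib
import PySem

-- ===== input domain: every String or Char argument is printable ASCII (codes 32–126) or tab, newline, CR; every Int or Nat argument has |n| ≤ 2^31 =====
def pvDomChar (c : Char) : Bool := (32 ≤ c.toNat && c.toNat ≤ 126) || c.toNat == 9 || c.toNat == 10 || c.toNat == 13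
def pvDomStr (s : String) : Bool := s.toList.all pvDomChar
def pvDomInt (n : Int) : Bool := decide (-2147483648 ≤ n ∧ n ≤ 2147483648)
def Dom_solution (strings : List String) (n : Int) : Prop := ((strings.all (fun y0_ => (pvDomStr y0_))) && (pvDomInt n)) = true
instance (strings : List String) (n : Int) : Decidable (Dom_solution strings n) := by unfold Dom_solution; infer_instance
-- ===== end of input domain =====

-- B replaces A's nested scan over sorted keys × strings by one grouping pass into a dict plus an
-- ordered emit with a seen-set (objective: faster, no repeated whole-list scans per key).
-- Both Pythons sort `strings` in place; the equivalence proved here is about the return value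
-- (B performs the same mutation).

-- ===== PORT A =====
def solution (strings : List String) (n : Int) : List String :=
  let lst := (PySem.List.pyRange 0 (PySem.List.len strings)).foldl
      (fun acc i => acc ++ [PySem.Str.slice (PySem.List.pyGetD strings i "") (some n) (some (n+1))]) []
  let strings1 := PySem.List.sorted strings (fun s => s)
  let lst1 := PySem.List.sorted lst (fun s => s)
  lst1.foldl (fun answer kj =>
      (PySem.List.pyRange 0 (PySem.List.len strings1)).foldl (fun answer i =>
        if PySem.Str.slice (PySem.List.pyGetD strings1 i "") (some n) (some (n+1)) = kj then
          if (PySem.List.pyGetD strings1 i "") ∈ answer then answer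
          else answer ++ [PySem.List.pyGetD strings1 i ""]
        else answer) answer) []

-- ===== PORT B =====
def solution_alt (strings : List String) (n : Int) : List String :=
  let ss := PySem.List.sorted strings (fun s => s)
  let groups := ss.foldl
      (fun d s => d.modify (PySem.Str.slice s (some n) (some (n+1))) [] (fun v => v ++ [s]))
      PySem.Dict.empty
  let p := (PySem.List.sorted groups.keys (fun k => k)).foldl
      (fun (p : List String × PySem.Set String) k =>
        (groups.getD k []).foldl
          (fun (p : List String × PySem.Set String) s =>
            if p.2.contains s then p else (p.1 ++ [s], p.2.add s)) p)
      ([], ([] : PySem.Set String))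
  p.1

-- ===== PRECONDITION & SPEC =====
def Spec_solution (strings : List String) (n : Int) (out : List String) : Prop := out = solution_alt strings n
instance (strings : List String) (n : Int) (out : List String) : Decidable (Spec_solution strings n out) := by unfold Spec_solution; infer_instance

-- ===== CLAIM (what is proved, stated in full; the proofs are below) =====
def Claim_equal_solution : Prop := ∀ (strings : List String) (n : Int), Dom_solution strings n → Spec_solution strings n (solution strings n)

-- ===== LEMMAS AND PROOFS =====

-- the nth-char slice key shared by both programs
def pvKey (n : Int) (s : String) : String := PySem.Str.slice s (some n) (some (n+1))

-- the dedup-append step ("if s not in answer: answer.append(s)")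
def pvD (ans : List String) (s : String) : List String := if s ∈ ans then ans else ans ++ [s]

-- B's paired step (answer, seen)
def pvB (p : List String × PySem.Set String) (s : String) : List String × PySem.Set String :=
  if p.2.contains s then p else (p.1 ++ [s], p.2.add s)

-- the strings of ss whose key is k (B's group, A's inner matches)
def pvGroup (n : Int) (ss : List String) (k : String) : List String :=
  ss.filter (fun s => pvKey n s == k)

-- keys of K not yet in P, first occurrences, in order
def pvNew (P : PySem.Set String) : List String → List String
  | [] => []
  | k :: K => if P.contains k then pvNew P K else k :: pvNew (P.add k) K

theorem pv_mem_foldl_pvD (l : List String) (ans : List String) (x : String) :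
    x ∈ l.foldl pvD ans ↔ x ∈ ans ∨ x ∈ l := by
  induction l generalizing ans with
  | nil => simp
  | cons a l ih =>
    by_cases ha : a ∈ ans
    · simp only [List.foldl_cons, pvD, ha, if_true, ih, List.mem_cons]
      constructor
      · tauto
      · rintro (h1 | rfl | h1) <;> tauto
    · simp only [List.foldl_cons, pvD, ha, if_false, ih, List.mem_cons, List.mem_append]
      tauto

theorem pv_foldl_pvD_noop (l : List String) (ans : List String) (h : ∀ s ∈ l, s ∈ ans) :
    l.foldl pvD ans = ans := by
  induction l generalizing ans with
  | nil => rfl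
  | cons a l ih =>
    simp only [List.foldl_cons, pvD, if_pos (h a (by simp))]
    exact ih ans (fun s hs => h s (by simp [hs]))

theorem pv_inner_A (n : Int) (k : String) (ss : List String) (ans : List String) :
    ss.foldl (fun ans s =>
        if PySem.Str.slice s (some n) (some (n+1)) = k then
          if s ∈ ans then ans else ans ++ [s]
        else ans) ans
      = (pvGroup n ss k).foldl pvD ans := by
  induction ss generalizing ans with
  | nil => rfl
  | cons a ss ih =>
    by_cases h : PySem.Str.slice a (some n) (some (n+1)) = k
    · rw [List.foldl_cons, if_pos h, ih]
      simp [pvGroup, pvKey, h, pvD]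
    · rw [List.foldl_cons, if_neg h, ih]
      simp [pvGroup, pvKey, h]

theorem pv_groups_getD (n : Int) (ss : List String) (k : String) :
    (ss.foldl
        (fun d s => d.modify (PySem.Str.slice s (some n) (some (n+1))) [] (fun v => v ++ [s]))
        PySem.Dict.empty).getD k []
      = pvGroup n ss k := by
  have h : ss.foldl
        (fun d s => d.modify (PySem.Str.slice s (some n) (some (n+1))) [] (fun v => v ++ [s]))
        PySem.Dict.empty
      = (ss.map (fun s => (pvKey n s, s))).foldl
          (fun d p => d.modify p.1 [] (fun v => v ++ [p.2])) PySem.Dict.empty := by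
    rw [List.foldl_map]; rfl
  rw [h, PySem.Dict.getD_foldl_modify_append]
  show ([] : List String) ++ _ = _
  rw [List.nil_append, List.filter_map, List.map_map]
  simp [pvGroup, pvKey, Function.comp_def]

theorem pv_pair_fold (l : List String) (ans : List String) (seen : PySem.Set String)
    (h : ∀ s, seen.contains s = decide (s ∈ ans)) :
    (l.foldl pvB (ans, seen)).1 = l.foldl pvD ans ∧
      ∀ s, ((l.foldl pvB (ans, seen)).2).contains s = decide (s ∈ l.foldl pvD ans) := by
  induction l generalizing ans seen with
  | nil => exact ⟨rfl, h⟩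
  | cons a l ih =>
    simp only [List.foldl_cons, pvB, pvD, h a]
    by_cases ha : a ∈ ans
    · simp only [ha, decide_true, if_true]
      exact ih ans seen h
    · simp only [ha, decide_false, Bool.false_eq_true, if_false]
      refine ih (ans ++ [a]) (seen.add a) ?_
      intro s
      have hca : PySem.Set.contains seen a = false := by rw [h a]; simp [ha]
      show PySem.Set.contains (PySem.Set.add seen a) s = _
      unfold PySem.Set.add
      rw [hca]
      simp only [Bool.false_eq_true, if_false, PySem.Set.contains, List.contains_eq_mem,
        List.mem_append, List.mem_singleton]
      have hsm : (s ∈ seen) = (s ∈ ans) := by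
        have := h s
        simp only [PySem.Set.contains, List.contains_eq_mem] at this
        by_cases hs : s ∈ seen <;> by_cases hs' : s ∈ ans <;> simp_all
      simp [hsm]

theorem pv_outer_pair (n : Int) (ss : List String) (K : List String)
    (ans : List String) (seen : PySem.Set String)
    (h : ∀ s, seen.contains s = decide (s ∈ ans)) :
    (K.foldl (fun p k => (pvGroup n ss k).foldl pvB p) (ans, seen)).1
      = K.foldl (fun ans k => (pvGroup n ss k).foldl pvD ans) ans := by
  induction K generalizing ans seen with
  | nil => rfl
  | cons k K ih =>
    simp only [List.foldl_cons]
    obtain ⟨h1, h2⟩ := pv_pair_fold (pvGroup n ss k) ans seen h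
    rw [show (pvGroup n ss k).foldl pvB (ans, seen)
          = (((pvGroup n ss k).foldl pvB (ans, seen)).1,
             ((pvGroup n ss k).foldl pvB (ans, seen)).2) from rfl, h1]
    exact ih _ _ h2

theorem pv_fold_new (n : Int) (ss : List String) (K : List String)
    (P : PySem.Set String) (ans : List String)
    (hP : ∀ k ∈ P, ∀ s ∈ pvGroup n ss k, s ∈ ans) :
    K.foldl (fun ans k => (pvGroup n ss k).foldl pvD ans) ans
      = (pvNew P K).foldl (fun ans k => (pvGroup n ss k).foldl pvD ans) ans := by
  induction K generalizing P ans with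
  | nil => rfl
  | cons k K ih =>
    simp only [List.foldl_cons, pvNew]
    by_cases hk : P.contains k
    · simp only [hk, if_true]
      rw [pv_foldl_pvD_noop _ _ (hP k (by simpa [PySem.Set.contains] using hk))]
      exact ih P ans hP
    · simp only [hk, Bool.false_eq_true, if_false]
      refine ih (P.add k) _ ?_
      intro k' hk' s hs
      rcases (PySem.Set.mem_add P k k').1 hk' with h' | h'
      · exact (pv_mem_foldl_pvD _ _ _).2 (Or.inl (hP k' h' s hs))
      · subst h'
        exact (pv_mem_foldl_pvD _ _ _).2 (Or.inr hs)

theorem pv_new_sublist (P : PySem.Set String) (K : List String) :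
    (pvNew P K).Sublist K := by
  induction K generalizing P with
  | nil => simp [pvNew]
  | cons k K ih =>
    simp only [pvNew]
    split
    · exact (ih P).cons k
    · exact (ih (P.add k)).cons₂ k

theorem pv_mem_new (P : PySem.Set String) (K : List String) (x : String) :
    x ∈ pvNew P K ↔ x ∈ K ∧ x ∉ P := by
  induction K generalizing P with
  | nil => simp [pvNew]
  | cons k K ih =>
    simp only [pvNew]
    cases hk : PySem.Set.contains P k with
    | true =>
      have hkP : k ∈ P := by simpa [PySem.Set.contains, List.contains_eq_mem] using hk
      simp only [if_true, ih, List.mem_cons]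
      constructor
      · rintro ⟨h1, h2⟩; exact ⟨Or.inr h1, h2⟩
      · rintro ⟨h1 | h1, h2⟩
        · exact absurd (h1 ▸ hkP) h2
        · exact ⟨h1, h2⟩
    | false =>
      have hkP : k ∉ P := by simpa [PySem.Set.contains, List.contains_eq_mem] using hk
      simp only [Bool.false_eq_true, if_false, List.mem_cons, ih]
      constructor
      · rintro (h1 | ⟨h1, h2⟩)
        · exact ⟨Or.inl h1, h1 ▸ hkP⟩
        · exact ⟨Or.inr h1, fun hx => h2 ((PySem.Set.mem_add P k x).2 (Or.inl hx))⟩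
      · rintro ⟨h1 | h1, h2⟩
        · exact Or.inl h1
        · by_cases hx : x = k
          · exact Or.inl hx
          · exact Or.inr ⟨h1, fun hx' => h2 (((PySem.Set.mem_add P k x).1 hx').resolve_right hx)⟩

theorem pv_nodup_new (P : PySem.Set String) (K : List String) :
    (pvNew P K).Nodup := by
  induction K generalizing P with
  | nil => simp [pvNew]
  | cons k K ih =>
    simp only [pvNew]
    split
    · exact ih P
    · refine List.Nodup.cons ?_ (ih (P.add k))
      intro hk
      exact ((pv_mem_new (P.add k) K k).1 hk).2 ((PySem.Set.mem_add P k k).2 (Or.inr rfl))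

theorem pv_new_eq_sorted_ofList (km : List String) :
    pvNew ([] : PySem.Set String) (PySem.List.sorted km (fun k => k))
      = PySem.List.sorted (PySem.Set.ofList km) (fun k => k) := by
  apply Eq.symm
  apply PySem.List.sorted_eq_of_perm_of_pairwise_lt
  · rw [List.perm_ext_iff_of_nodup (pv_nodup_new _ _) (PySem.Set.nodup_ofList km)]
    intro a
    rw [pv_mem_new, PySem.Set.mem_ofList]
    simp [PySem.List.mem_sorted]
  · have hle : (pvNew ([] : PySem.Set String) (PySem.List.sorted km (fun k => k))).Pairwise
        (fun a b => a ≤ b) :=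
      List.Pairwise.sublist (pv_new_sublist _ _) (PySem.List.sorted_pairwise km (fun k => k))
    have hne := pv_nodup_new ([] : PySem.Set String) (PySem.List.sorted km (fun k => k))
    exact (hle.and hne).imp (fun h => lt_of_le_of_ne h.1 h.2)

theorem pv_main (strings : List String) (n : Int) :
    solution strings n = solution_alt strings n := by
  simp only [solution, solution_alt]
  have h1 : (PySem.List.pyRange 0 (PySem.List.len strings)).foldl
      (fun acc i => acc ++ [PySem.Str.slice (PySem.List.pyGetD strings i "") (some n) (some (n+1))]) []
      = strings.map (pvKey n) := by
    rw [PySem.List.foldl_pyRange_pyGetD strings ""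
      (fun acc s => acc ++ [PySem.Str.slice s (some n) (some (n+1))]) [] (le_refl 0)]
    rw [Int.toNat_zero, List.drop_zero, PySem.List.foldl_append_singleton_eq_map]
    rfl
  rw [h1]
  set ss := PySem.List.sorted strings (fun s => s) with hss
  have h2 : PySem.List.sorted (strings.map (pvKey n)) (fun s => s)
      = PySem.List.sorted (ss.map (pvKey n)) (fun s => s) :=
    PySem.List.sorted_eq_sorted_of_perm _ _ _ (fun _ _ h => h)
      (((PySem.List.sorted_perm strings (fun s => s) false).symm).map (pvKey n))
  have h3 : ∀ (kj : String) (ans : List String), (PySem.List.pyRange 0 (PySem.List.len ss)).foldl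
      (fun answer i =>
        if PySem.Str.slice (PySem.List.pyGetD ss i "") (some n) (some (n+1)) = kj then
          if (PySem.List.pyGetD ss i "") ∈ answer then answer
          else answer ++ [PySem.List.pyGetD ss i ""]
        else answer) ans
      = (pvGroup n ss kj).foldl pvD ans := by
    intro kj ans
    rw [PySem.List.foldl_pyRange_pyGetD ss ""
      (fun answer s => if PySem.Str.slice s (some n) (some (n+1)) = kj then
          if s ∈ answer then answer else answer ++ [s] else answer) ans (le_refl 0)]
    rw [Int.toNat_zero, List.drop_zero]
    exact pv_inner_A n kj ss ans
  simp only [h2, h3]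
  have h4 : (ss.foldl (fun d s =>
        d.modify (PySem.Str.slice s (some n) (some (n+1))) [] (fun v => v ++ [s]))
        PySem.Dict.empty).keys
      = PySem.Set.ofList (ss.map (pvKey n)) := by
    rw [PySem.Dict.keys_foldl_modify_key ss
      (fun s => PySem.Str.slice s (some n) (some (n+1))) [] (fun _ s => fun v => v ++ [s])
      PySem.Dict.empty]
    rfl
  simp only [h4, pv_groups_getD]
  rw [show (fun (p : List String × PySem.Set String) s =>
        if p.2.contains s then p else (p.1 ++ [s], p.2.add s)) = pvB from rfl]
  rw [pv_outer_pair n ss (PySem.List.sorted (PySem.Set.ofList (ss.map (pvKey n))) (fun k => k))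
      [] [] (by intro s; simp [PySem.Set.contains])]
  rw [pv_fold_new n ss (PySem.List.sorted (ss.map (pvKey n)) (fun s => s)) [] []
      (by intro k hk; cases hk)]
  rw [pv_new_eq_sorted_ofList (ss.map (pvKey n))]

-- ===== VERDICT (by name: the statement is the Claim_ definition above) =====
theorem solution_spec : Claim_equal_solution := by
  intro strings n _
  exact pv_main strings n
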